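-- pv_equiv track=rewrite | github.com/Mumulhy/LeetCode | 1995-统计特殊四元组/CountQuadruplets.py | countQuadruplets
-- ===== SOURCE A (Python) =====
-- from collections import defaultdict
-- from typing import List
--
-- def countQuadruplets(nums: List[int]) -> int:
--     n = len(nums)
--     ans = 0
--     cnt = defaultdict(int)
--     for b in range(n - 3, 0, -1):
--         for d in range(b + 2, n):
--             if (diff := nums[d] - nums[b + 1]) > 1:
--                 cnt[diff] += 1
--         for a in range(b):
--             if (total := nums[a] + nums[b]) in cnt:
--                 ans += cnt[total]
--     return ans
-- ===== SOURCE B (Python) =====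
-- def countQuadruplets(nums):
--     # Brute force over index pairs: for every later pair c < d whose difference
--     # nums[d] - nums[c] exceeds 1, count the earlier pairs a < b (with b < c)
--     # whose sum nums[a] + nums[b] equals that difference.
--     n = len(nums)
--     ans = 0
--     for c in range(n):
--         for d in range(c + 1, n):
--             diff = nums[d] - nums[c]
--             if diff > 1:
--                 for a in range(c):
--                     for b in range(a + 1, c):
--                         if nums[a] + nums[b] == diff:
--                             ans += 1
--     return ans
-- ===== Notes on version B (the rewrite author's own statement) =====
-- stated objective: simpler
-- what changed: Replaced the two-phase counting algorithm (a reverse loop over b maintaining a defaultdict of pair differences, then looked up for every a < b) by a direct brute-force enumeration: for each pair c < d with nums[d] - nums[c] > 1, scan all earlier pairs a < b < c and count those whose sum equals that difference; no dictionary is kept.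
import Mathlib
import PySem

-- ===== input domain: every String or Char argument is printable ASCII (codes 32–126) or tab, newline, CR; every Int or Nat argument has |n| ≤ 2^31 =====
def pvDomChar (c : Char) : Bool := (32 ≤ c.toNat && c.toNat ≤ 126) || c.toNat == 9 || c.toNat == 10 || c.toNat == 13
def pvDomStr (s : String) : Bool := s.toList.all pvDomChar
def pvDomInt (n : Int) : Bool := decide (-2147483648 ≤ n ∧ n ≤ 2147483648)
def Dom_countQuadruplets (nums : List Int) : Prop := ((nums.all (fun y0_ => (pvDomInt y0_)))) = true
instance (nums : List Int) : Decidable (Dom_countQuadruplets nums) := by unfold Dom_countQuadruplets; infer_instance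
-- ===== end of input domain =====

-- B replaces A's running difference-dictionary by a direct brute-force enumeration of the pairs
-- (c, d) with nums[d] - nums[c] > 1 and the earlier pairs a < b < c summing to that difference
-- (simpler, not faster).

-- ===== PORT A =====
def countQuadruplets (nums : List Int) : Int :=
  let n : Int := nums.length
  let st := (PySem.List.pyRange (n - 3) 0 (-1)).foldl
    (fun (st : Int × PySem.Dict Int Int) b =>
      let cnt := (PySem.List.pyRange (b + 2) n 1).foldl
        (fun (cnt : PySem.Dict Int Int) d =>
          let diff := PySem.List.pyGetD nums d 0 - PySem.List.pyGetD nums (b + 1) 0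
          if 1 < diff then cnt.modify diff 0 (· + 1) else cnt) st.2
      let ans := (PySem.List.pyRange 0 b 1).foldl
        (fun (ans : Int) a =>
          let total := PySem.List.pyGetD nums a 0 + PySem.List.pyGetD nums b 0
          if cnt.contains total then ans + cnt.getD total 0 else ans) st.1
      (ans, cnt))
    ((0 : Int), (PySem.Dict.empty : PySem.Dict Int Int))
  st.1
-- ===== PORT B =====
def countQuadruplets_alt (nums : List Int) : Int :=
  let n : Int := nums.length
  (PySem.List.pyRange 0 n 1).foldl (fun ansc c =>
    (PySem.List.pyRange (c + 1) n 1).foldl (fun ansd d =>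
      let diff := PySem.List.pyGetD nums d 0 - PySem.List.pyGetD nums c 0
      if 1 < diff then
        (PySem.List.pyRange 0 c 1).foldl (fun ansa a =>
          (PySem.List.pyRange (a + 1) c 1).foldl (fun ansb b =>
            if PySem.List.pyGetD nums a 0 + PySem.List.pyGetD nums b 0 = diff
            then ansb + 1 else ansb) ansa) ansd
      else ansd) ansc) 0

-- ===== PRECONDITION & SPEC =====
def Spec_countQuadruplets (nums : List Int) (out : Int) : Prop := out = countQuadruplets_alt nums
instance (nums : List Int) (out : Int) : Decidable (Spec_countQuadruplets nums out) := by
  unfold Spec_countQuadruplets; infer_instance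

-- ===== CLAIM (what is proved, stated in full; the proofs are below) =====
def Claim_equal_countQuadruplets : Prop :=
  ∀ (nums : List Int), Dom_countQuadruplets nums → Spec_countQuadruplets nums (countQuadruplets nums)

-- ===== LEMMAS AND PROOFS =====

def gV (nums : List Int) (i : Int) : Int := PySem.List.pyGetD nums i 0

def mCount (nums : List Int) (v c : Int) : Int :=
  ((PySem.List.pyRange (c + 1) (nums.length : Int) 1).countP
    (fun d => decide (gV nums d - gV nums c = v)) : Int)

-- what A's cnt dict holds for key v once all c ≥ lo have been folded in
def cntSpec (nums : List Int) (lo v : Int) : Int :=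
  if 1 < v then ((PySem.List.pyRange lo ((nums.length : Int) - 1) 1).map (mCount nums v)).sum
  else 0

-- number of (c, d) with b < c < d < n and nums[a]+nums[b]+nums[c] = nums[d]
def qCount (nums : List Int) (a b : Int) : Int :=
  ((PySem.List.pyRange (b + 1) (nums.length : Int) 1).map (fun c =>
    ((PySem.List.pyRange (c + 1) (nums.length : Int) 1).countP
      (fun d => decide (gV nums a + gV nums b + gV nums c = gV nums d)) : Int))).sum

-- A's contribution of the pair (a, b): quadruplets through it, but only when the pair sum exceeds 1
def qTerm (nums : List Int) (a b : Int) : Int :=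
  if 1 < gV nums a + gV nums b then qCount nums a b else 0

-- the body of A's outer loop, named so the invariant can speak about it
def ostep (nums : List Int) (st : Int × PySem.Dict Int Int) (b : Int) : Int × PySem.Dict Int Int :=
  let n : Int := nums.length
  let cnt := (PySem.List.pyRange (b + 2) n 1).foldl
    (fun (cnt : PySem.Dict Int Int) d =>
      let diff := PySem.List.pyGetD nums d 0 - PySem.List.pyGetD nums (b + 1) 0
      if 1 < diff then cnt.modify diff 0 (· + 1) else cnt) st.2
  let ans := (PySem.List.pyRange 0 b 1).foldl
    (fun (ans : Int) a =>
      let total := PySem.List.pyGetD nums a 0 + PySem.List.pyGetD nums b 0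
      if cnt.contains total then ans + cnt.getD total 0 else ans) st.1
  (ans, cnt)

theorem A_eq_fold (nums : List Int) :
    countQuadruplets nums
      = ((PySem.List.pyRange ((nums.length : Int) - 3) 0 (-1)).foldl (ostep nums)
          ((0 : Int), (PySem.Dict.empty : PySem.Dict Int Int))).1 := rfl

theorem Ico_int_insert_bot (a b : Int) (h : a < b) :
    Finset.Ico a b = insert a (Finset.Ico (a + 1) b) := by
  ext x; simp [Finset.mem_Ico]; omega

theorem sum_Ico_int_bot (a b : Int) (h : a < b) (f : Int → Int) :
    ∑ i ∈ Finset.Ico a b, f i = f a + ∑ i ∈ Finset.Ico (a + 1) b, f i := by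
  rw [Ico_int_insert_bot a b h, Finset.sum_insert (by simp [Finset.mem_Ico])]

theorem sum_Ico_int_top (a b : Int) (h : a ≤ b) (f : Int → Int) :
    ∑ i ∈ Finset.Ico a (b + 1), f i = (∑ i ∈ Finset.Ico a b, f i) + f b := by
  have : Finset.Ico a (b + 1) = insert b (Finset.Ico a b) := by
    ext x; simp [Finset.mem_Ico]; omega
  rw [this, Finset.sum_insert (by simp [Finset.mem_Ico])]; ring

theorem sum_map_pyRange_one (f : Int → Int) (b : Int) :
    ∀ (k : Nat) (a : Int), (b - a).toNat = k →
      ((PySem.List.pyRange a b 1).map f).sum = ∑ i ∈ Finset.Ico a b, f i := by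
  intro k
  induction k with
  | zero =>
    intro a hk
    rw [PySem.List.pyRange_one_eq_nil (by omega), Finset.Ico_eq_empty (by omega)]
    simp
  | succ k ih =>
    intro a hk
    rw [PySem.List.pyRange_one_cons (by omega), sum_Ico_int_bot a b (by omega)]
    simp only [List.map_cons, List.sum_cons]
    rw [ih (a + 1) (by omega)]

theorem sum_map_pyRange_one' (f : Int → Int) (a b : Int) :
    ((PySem.List.pyRange a b 1).map f).sum = ∑ i ∈ Finset.Ico a b, f i :=
  sum_map_pyRange_one f b (b - a).toNat a rfl

-- triangle swap
theorem tri_swap (N : Int) (F : Int → Int → Int) :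
    ∑ b ∈ Finset.Ico 0 N, ∑ a ∈ Finset.Ico 0 b, F a b
      = ∑ a ∈ Finset.Ico 0 N, ∑ b ∈ Finset.Ico (a + 1) N, F a b := by
  have h1 : ∀ b ∈ Finset.Ico 0 N, ∑ a ∈ Finset.Ico 0 b, F a b
      = ∑ a ∈ Finset.Ico 0 N, if a < b then F a b else 0 := by
    intro b hb
    rw [← Finset.sum_filter]
    congr 1
    ext x
    simp only [Finset.mem_filter, Finset.mem_Ico] at *
    omega
  have h2 : ∀ a ∈ Finset.Ico 0 N, ∑ b ∈ Finset.Ico (a + 1) N, F a b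
      = ∑ b ∈ Finset.Ico 0 N, if a < b then F a b else 0 := by
    intro a ha
    rw [← Finset.sum_filter]
    congr 1
    ext x
    simp only [Finset.mem_filter, Finset.mem_Ico] at *
    omega
  rw [Finset.sum_congr rfl h1, Finset.sum_congr rfl h2, Finset.sum_comm]

-- the inner two loops of B compute qCount
theorem count_filter_int (l : List Int) (p : Int → Bool) (v : Int) :
    (l.filter p).count v = if p v then l.count v else 0 := by
  induction l with
  | nil => simp
  | cons x t ih =>
    by_cases hx : p x
    · by_cases hv : x = v
      · subst hv; simp [hx, ih]
      · simp [hx, hv, ih]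
    · by_cases hv : x = v
      · subst hv; simp [hx, ih]
      · simp [hx, hv, ih]

theorem count_map_eq_countP (l : List Int) (f : Int → Int) (v : Int) :
    (l.map f).count v = l.countP (fun x => decide (f x = v)) := by
  induction l with
  | nil => simp
  | cons x t ih =>
    simp only [List.map_cons, List.count_cons, List.countP_cons, ih]
    by_cases h : f x = v
    · simp [h]
    · simp [h]

-- effect of A's d-loop on the counter
theorem dloop_getD (nums : List Int) (b : Int) (cnt : PySem.Dict Int Int) (v : Int) :
    ((PySem.List.pyRange (b + 2) (nums.length : Int) 1).foldl
      (fun (cnt : PySem.Dict Int Int) d =>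
        let diff := PySem.List.pyGetD nums d 0 - PySem.List.pyGetD nums (b + 1) 0
        if 1 < diff then cnt.modify diff 0 (· + 1) else cnt) cnt).getD v 0
      = cnt.getD v 0 + (if 1 < v then mCount nums v (b + 1) else 0) := by
  have h1 : (PySem.List.pyRange (b + 2) (nums.length : Int) 1).foldl
      (fun (cnt : PySem.Dict Int Int) d =>
        let diff := PySem.List.pyGetD nums d 0 - PySem.List.pyGetD nums (b + 1) 0
        if 1 < diff then cnt.modify diff 0 (· + 1) else cnt) cnt
      = (((PySem.List.pyRange (b + 2) (nums.length : Int) 1).map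
          (fun d => PySem.List.pyGetD nums d 0 - PySem.List.pyGetD nums (b + 1) 0)).foldl
        (fun (cnt : PySem.Dict Int Int) w => if 1 < w then cnt.modify w 0 (· + 1) else cnt) cnt) := by
    rw [List.foldl_map]
  rw [h1, PySem.List.foldl_ite_eq_foldl_filter, PySem.Dict.getD_foldl_modify_add_one,
    count_filter_int, count_map_eq_countP]
  have hm : mCount nums v (b + 1)
      = ((PySem.List.pyRange (b + 2) (nums.length : Int) 1).countP
          (fun d => decide (PySem.List.pyGetD nums d 0 - PySem.List.pyGetD nums (b + 1) 0 = v)) : Int) := by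
    unfold mCount gV
    rw [show b + 1 + 1 = b + 2 from by ring]
  by_cases hv : 1 < v
  · rw [if_pos hv, hm]
    simp [hv]
  · rw [if_neg hv]
    simp [hv]

-- effect of A's a-loop
theorem aloop_sum (nums : List Int) (b : Int) (cnt : PySem.Dict Int Int) (ans : Int) :
    (PySem.List.pyRange 0 b 1).foldl
      (fun (ans : Int) a =>
        let total := PySem.List.pyGetD nums a 0 + PySem.List.pyGetD nums b 0
        if cnt.contains total then ans + cnt.getD total 0 else ans) ans
      = ans + ∑ a ∈ Finset.Ico 0 b, cnt.getD (gV nums a + gV nums b) 0 := by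
  have hpt : ∀ (acc a : Int),
      (let total := PySem.List.pyGetD nums a 0 + PySem.List.pyGetD nums b 0
       if cnt.contains total then acc + cnt.getD total 0 else acc)
        = acc + cnt.getD (gV nums a + gV nums b) 0 := by
    intro acc a
    show (if cnt.contains (PySem.List.pyGetD nums a 0 + PySem.List.pyGetD nums b 0) = true
          then acc + cnt.getD (PySem.List.pyGetD nums a 0 + PySem.List.pyGetD nums b 0) 0
          else acc) = _
    by_cases hc : cnt.contains (PySem.List.pyGetD nums a 0 + PySem.List.pyGetD nums b 0) = true
    · rw [if_pos hc]; rfl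
    · rw [if_neg hc]
      show acc = acc + cnt.getD (PySem.List.pyGetD nums a 0 + PySem.List.pyGetD nums b 0) 0
      rw [PySem.Dict.getD_of_not_contains cnt 0 (by simpa using hc), add_zero]
  rw [PySem.List.foldl_congr_mem _ _ _ _ (fun acc a _ => hpt acc a),
    PySem.List.foldl_add, sum_map_pyRange_one']

-- the outer-loop invariant of A
theorem A_outer (nums : List Int) : ∀ (k : Nat) (b : Int), b.toNat = k →
    b ≤ (nums.length : Int) - 3 →
    ∀ (ans : Int) (cnt : PySem.Dict Int Int),
    (∀ v, cnt.getD v 0 = cntSpec nums (b + 2) v) →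
    ((PySem.List.pyRange b 0 (-1)).foldl (ostep nums) (ans, cnt)).1
      = ans + ∑ b' ∈ Finset.Ico 1 (b + 1), ∑ a ∈ Finset.Ico 0 b',
          cntSpec nums (b' + 1) (gV nums a + gV nums b') := by
  intro k
  induction k with
  | zero =>
    intro b hk hb ans cnt hcnt
    rw [PySem.List.pyRange_neg_one_eq_nil (by omega)]
    rw [Finset.Ico_eq_empty (by omega)]
    simp
  | succ k ih =>
    intro b hk hb ans cnt hcnt
    rw [PySem.List.pyRange_neg_one_cons (by omega), List.foldl_cons]
    have hcnt' : ∀ v, ((PySem.List.pyRange (b + 2) (nums.length : Int) 1).foldl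
        (fun (cnt : PySem.Dict Int Int) d =>
          let diff := PySem.List.pyGetD nums d 0 - PySem.List.pyGetD nums (b + 1) 0
          if 1 < diff then cnt.modify diff 0 (· + 1) else cnt) cnt).getD v 0
        = cntSpec nums (b + 1) v := by
      intro v
      rw [dloop_getD, hcnt v]
      unfold cntSpec
      by_cases hv : 1 < v
      · rw [if_pos hv, if_pos hv, if_pos hv,
          PySem.List.pyRange_one_cons (show b + 1 < (nums.length : Int) - 1 by omega)]
        simp only [List.map_cons, List.sum_cons]
        rw [show b + 1 + 1 = b + 2 from by ring]
        ring
      · simp [hv]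
    have h1 : (ostep nums (ans, cnt) b).2
        = (PySem.List.pyRange (b + 2) (nums.length : Int) 1).foldl
          (fun (cnt : PySem.Dict Int Int) d =>
            let diff := PySem.List.pyGetD nums d 0 - PySem.List.pyGetD nums (b + 1) 0
            if 1 < diff then cnt.modify diff 0 (· + 1) else cnt) cnt := rfl
    have h2 : (ostep nums (ans, cnt) b).1
        = ans + ∑ a ∈ Finset.Ico 0 b, cntSpec nums (b + 1) (gV nums a + gV nums b) := by
      show (PySem.List.pyRange 0 b 1).foldl
        (fun (ans : Int) a =>
          let total := PySem.List.pyGetD nums a 0 + PySem.List.pyGetD nums b 0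
          if ((PySem.List.pyRange (b + 2) (nums.length : Int) 1).foldl
              (fun (cnt : PySem.Dict Int Int) d =>
                let diff := PySem.List.pyGetD nums d 0 - PySem.List.pyGetD nums (b + 1) 0
                if 1 < diff then cnt.modify diff 0 (· + 1) else cnt) cnt).contains total
          then ans + ((PySem.List.pyRange (b + 2) (nums.length : Int) 1).foldl
              (fun (cnt : PySem.Dict Int Int) d =>
                let diff := PySem.List.pyGetD nums d 0 - PySem.List.pyGetD nums (b + 1) 0
                if 1 < diff then cnt.modify diff 0 (· + 1) else cnt) cnt).getD total 0
          else ans) ans = _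
      rw [aloop_sum]
      congr 1
      exact Finset.sum_congr rfl (fun a _ => hcnt' _)
    have hrw : ostep nums (ans, cnt) b
        = ((ostep nums (ans, cnt) b).1, (ostep nums (ans, cnt) b).2) := rfl
    rw [hrw, h1, h2,
      ih (b - 1) (by omega) (by omega) _ _
        (fun v => by rw [show b - 1 + 2 = b + 1 from by ring]; exact hcnt' v),
      show b - 1 + 1 = b from by ring, sum_Ico_int_top 1 b (by omega)]
    ring

theorem A_char (nums : List Int) :
    countQuadruplets nums
      = ∑ b ∈ Finset.Ico 1 ((nums.length : Int) - 2), ∑ a ∈ Finset.Ico 0 b,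
          cntSpec nums (b + 1) (gV nums a + gV nums b) := by
  rw [A_eq_fold]
  have h := A_outer nums ((nums.length : Int) - 3).toNat ((nums.length : Int) - 3) rfl le_rfl
    0 PySem.Dict.empty (by
      intro v
      rw [PySem.Dict.getD_empty]
      unfold cntSpec
      rw [PySem.List.pyRange_one_eq_nil (by omega)]
      simp)
  rw [h, zero_add, show (nums.length : Int) - 3 + 1 = (nums.length : Int) - 2 from by ring]

-- A as a sum over the same triangular region as B
theorem A_char' (nums : List Int) :
    countQuadruplets nums
      = ∑ a ∈ Finset.Ico 0 (nums.length : Int), ∑ b ∈ Finset.Ico (a + 1) (nums.length : Int),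
          cntSpec nums (b + 1) (gV nums a + gV nums b) := by
  rw [A_char, ← tri_swap]
  apply Finset.sum_subset
  · intro b hb
    simp only [Finset.mem_Ico] at *
    omega
  · intro b hb hnb
    simp only [Finset.mem_Ico, not_and, not_lt] at hb hnb
    rcases lt_or_ge b 1 with h1 | h1
    · rw [Finset.Ico_eq_empty (by omega), Finset.sum_empty]
    · apply Finset.sum_eq_zero
      intro a _
      unfold cntSpec
      rw [PySem.List.pyRange_one_eq_nil (by omega)]
      simp

-- the counting parts agree: c ∈ (b, n-1) with diff-count = c ∈ (b, n) with sum-count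
theorem sum_m_eq_q (nums : List Int) (a b : Int) (hb : b + 1 ≤ (nums.length : Int) - 1) :
    ((PySem.List.pyRange (b + 1) ((nums.length : Int) - 1) 1).map
      (mCount nums (gV nums a + gV nums b))).sum = qCount nums a b := by
  unfold qCount
  rw [PySem.List.pyRange_one_append (b + 1) ((nums.length : Int) - 1) (nums.length : Int)
    hb (by omega)]
  rw [List.map_append, List.sum_append]
  have hlast : ((PySem.List.pyRange ((nums.length : Int) - 1) (nums.length : Int) 1).map (fun c =>
      ((PySem.List.pyRange (c + 1) (nums.length : Int) 1).countP
        (fun d => decide (gV nums a + gV nums b + gV nums c = gV nums d)) : Int))).sum = 0 := by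
    apply List.sum_eq_zero
    intro x hx
    simp only [List.mem_map] at hx
    obtain ⟨c, hc, rfl⟩ := hx
    rw [PySem.List.mem_pyRange_one] at hc
    rw [PySem.List.pyRange_one_eq_nil (by omega)]
    simp
  rw [hlast, add_zero]
  refine congrArg List.sum (List.map_congr_left ?_)
  intro c hc
  unfold mCount
  refine congrArg Int.ofNat (List.countP_congr ?_)
  intro d hd
  simp only [decide_eq_true_eq]
  constructor <;> intro h <;> omega

-- A's pair term is B's pair count behind A's 'diff > 1' guard
theorem term_eq (nums : List Int) (a b : Int) :
    cntSpec nums (b + 1) (gV nums a + gV nums b) = qTerm nums a b := by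
  unfold qTerm
  by_cases h : 1 < gV nums a + gV nums b
  · rw [if_pos h]
    unfold cntSpec
    rw [if_pos h]
    rcases lt_or_ge ((nums.length : Int) - 1) (b + 1) with hb | hb
    · rw [PySem.List.pyRange_one_eq_nil (by omega)]
      simp only [List.map_nil, List.sum_nil]
      symm
      unfold qCount
      apply List.sum_eq_zero
      intro x hx
      simp only [List.mem_map] at hx
      obtain ⟨c, hc, rfl⟩ := hx
      rw [PySem.List.mem_pyRange_one] at hc
      rw [PySem.List.pyRange_one_eq_nil (by omega)]
      simp
    · exact sum_m_eq_q nums a b hb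
  · rw [if_neg h]
    unfold cntSpec
    rw [if_neg h]

theorem A_char'' (nums : List Int) :
    countQuadruplets nums
      = ∑ a ∈ Finset.Ico 0 (nums.length : Int), ∑ b ∈ Finset.Ico (a + 1) (nums.length : Int),
          qTerm nums a b := by
  rw [A_char']
  exact Finset.sum_congr rfl (fun a _ => Finset.sum_congr rfl (fun b _ => term_eq nums a b))

-- the common quadruple indicator both ports are summed into
def indQ (nums : List Int) (a b c d : Int) : Int :=
  if a < b ∧ b < c ∧ c < d ∧ 1 < gV nums a + gV nums b ∧
      gV nums a + gV nums b + gV nums c = gV nums d then 1 else 0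

-- A's pair count as a double indicator sum over the full index square
theorem qTerm_quad (nums : List Int) (a b : Int) (ha : 0 ≤ a) (hab : a < b)
    (_hbn : b < (nums.length : Int)) :
    qTerm nums a b
      = ∑ c ∈ Finset.Ico 0 (nums.length : Int), ∑ d ∈ Finset.Ico 0 (nums.length : Int),
          indQ nums a b c d := by
  by_cases hs : 1 < gV nums a + gV nums b
  · have hq : qCount nums a b
        = ∑ c ∈ Finset.Ico (b + 1) (nums.length : Int), ∑ d ∈ Finset.Ico (c + 1) (nums.length : Int),
            (if gV nums a + gV nums b + gV nums c = gV nums d then (1 : Int) else 0) := by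
      unfold qCount
      rw [show ((PySem.List.pyRange (b + 1) (nums.length : Int) 1).map (fun c =>
          ((PySem.List.pyRange (c + 1) (nums.length : Int) 1).countP
            (fun d => decide (gV nums a + gV nums b + gV nums c = gV nums d)) : Int))).sum
          = ((PySem.List.pyRange (b + 1) (nums.length : Int) 1).map (fun c =>
            ∑ d ∈ Finset.Ico (c + 1) (nums.length : Int),
              (if gV nums a + gV nums b + gV nums c = gV nums d then (1 : Int) else 0))).sum from
        congrArg List.sum (List.map_congr_left (fun c _ => by
          rw [← PySem.List.sum_map_ite_one_zero, sum_map_pyRange_one']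
          simp only [decide_eq_true_eq])), sum_map_pyRange_one']
    unfold qTerm
    rw [if_pos hs, hq]
    have hinner : ∀ c, b < c →
        (∑ d ∈ Finset.Ico (c + 1) (nums.length : Int),
          (if gV nums a + gV nums b + gV nums c = gV nums d then (1 : Int) else 0))
        = ∑ d ∈ Finset.Ico 0 (nums.length : Int), indQ nums a b c d := by
      intro c hc
      have h1 : ∀ d ∈ Finset.Ico (c + 1) (nums.length : Int),
          (if gV nums a + gV nums b + gV nums c = gV nums d then (1 : Int) else 0)
            = indQ nums a b c d := by
        intro d hd
        simp only [Finset.mem_Ico] at hd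
        unfold indQ
        exact if_congr (by constructor <;> intro h <;> [exact ⟨hab, hc, by omega, hs, h⟩; omega])
          rfl rfl
      rw [Finset.sum_congr rfl h1]
      apply Finset.sum_subset
      · intro x hx; simp only [Finset.mem_Ico] at *; omega
      · intro x hx hnx
        simp only [Finset.mem_Ico, not_and, not_lt] at hx hnx
        unfold indQ
        rw [if_neg (by intro h; omega)]
    rw [Finset.sum_congr rfl (fun c hc => hinner c (by simp only [Finset.mem_Ico] at hc; omega))]
    apply Finset.sum_subset
    · intro x hx; simp only [Finset.mem_Ico] at *; omega
    · intro x hx hnx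
      simp only [Finset.mem_Ico, not_and, not_lt] at hx hnx
      apply Finset.sum_eq_zero
      intro d _
      unfold indQ
      rw [if_neg (by intro h; omega)]
  · unfold qTerm
    rw [if_neg hs]
    symm
    apply Finset.sum_eq_zero
    intro c _
    apply Finset.sum_eq_zero
    intro d _
    unfold indQ
    rw [if_neg (by intro h; exact hs h.2.2.2.1)]

-- A as the quadruple-indicator sum over the full fourth power of the index range
theorem A_quad (nums : List Int) :
    countQuadruplets nums
      = ∑ a ∈ Finset.Ico 0 (nums.length : Int), ∑ b ∈ Finset.Ico 0 (nums.length : Int),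
          ∑ c ∈ Finset.Ico 0 (nums.length : Int), ∑ d ∈ Finset.Ico 0 (nums.length : Int),
            indQ nums a b c d := by
  rw [A_char'']
  refine Finset.sum_congr rfl (fun a ha => ?_)
  simp only [Finset.mem_Ico] at ha
  rw [Finset.sum_congr rfl (fun b hb => qTerm_quad nums a b ha.1
    (by simp only [Finset.mem_Ico] at hb; omega) (by simp only [Finset.mem_Ico] at hb; omega))]
  apply Finset.sum_subset
  · intro x hx; simp only [Finset.mem_Ico] at *; omega
  · intro x hx hnx
    simp only [Finset.mem_Ico, not_and, not_lt] at hx hnx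
    apply Finset.sum_eq_zero
    intro c _
    apply Finset.sum_eq_zero
    intro d _
    unfold indQ
    rw [if_neg (by intro h; omega)]

-- B's inner two loops: the count of earlier pairs summing to s
theorem Balt_ab (nums : List Int) (c s : Int) (acc : Int) :
    (PySem.List.pyRange 0 c 1).foldl (fun ansa a =>
      (PySem.List.pyRange (a + 1) c 1).foldl (fun ansb b =>
        if PySem.List.pyGetD nums a 0 + PySem.List.pyGetD nums b 0 = s
        then ansb + 1 else ansb) ansa) acc
      = acc + ∑ a ∈ Finset.Ico 0 c, ∑ b ∈ Finset.Ico (a + 1) c,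
          (if gV nums a + gV nums b = s then (1 : Int) else 0) := by
  have hstep : ∀ (ansa a : Int),
      (PySem.List.pyRange (a + 1) c 1).foldl (fun ansb b =>
        if PySem.List.pyGetD nums a 0 + PySem.List.pyGetD nums b 0 = s
        then ansb + 1 else ansb) ansa
        = ansa + ∑ b ∈ Finset.Ico (a + 1) c,
            (if gV nums a + gV nums b = s then (1 : Int) else 0) := by
    intro ansa a
    rw [PySem.List.foldl_ite_add_one, ← PySem.List.sum_map_ite_one_zero, sum_map_pyRange_one']
    simp only [decide_eq_true_eq]
    rfl
  rw [PySem.List.foldl_congr_mem _ _ _ _ (fun ansa a _ => hstep ansa a),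
    PySem.List.foldl_add, sum_map_pyRange_one']

-- B as a sum over the later pairs (c, d)
theorem B_char (nums : List Int) :
    countQuadruplets_alt nums
      = ∑ c ∈ Finset.Ico 0 (nums.length : Int), ∑ d ∈ Finset.Ico (c + 1) (nums.length : Int),
          (if 1 < gV nums d - gV nums c then
            ∑ a ∈ Finset.Ico 0 c, ∑ b ∈ Finset.Ico (a + 1) c,
              (if gV nums a + gV nums b = gV nums d - gV nums c then (1 : Int) else 0)
          else 0) := by
  show (PySem.List.pyRange 0 (nums.length : Int) 1).foldl (fun ansc c =>
    (PySem.List.pyRange (c + 1) (nums.length : Int) 1).foldl (fun ansd d =>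
      let diff := PySem.List.pyGetD nums d 0 - PySem.List.pyGetD nums c 0
      if 1 < diff then
        (PySem.List.pyRange 0 c 1).foldl (fun ansa a =>
          (PySem.List.pyRange (a + 1) c 1).foldl (fun ansb b =>
            if PySem.List.pyGetD nums a 0 + PySem.List.pyGetD nums b 0 = diff
            then ansb + 1 else ansb) ansa) ansd
      else ansd) ansc) 0 = _
  have hd : ∀ (ansd : Int) (c d : Int),
      (let diff := PySem.List.pyGetD nums d 0 - PySem.List.pyGetD nums c 0
       if 1 < diff then
        (PySem.List.pyRange 0 c 1).foldl (fun ansa a =>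
          (PySem.List.pyRange (a + 1) c 1).foldl (fun ansb b =>
            if PySem.List.pyGetD nums a 0 + PySem.List.pyGetD nums b 0 = diff
            then ansb + 1 else ansb) ansa) ansd
       else ansd)
        = ansd + (if 1 < gV nums d - gV nums c then
            ∑ a ∈ Finset.Ico 0 c, ∑ b ∈ Finset.Ico (a + 1) c,
              (if gV nums a + gV nums b = gV nums d - gV nums c then (1 : Int) else 0)
          else 0) := by
    intro ansd c d
    show (if 1 < PySem.List.pyGetD nums d 0 - PySem.List.pyGetD nums c 0 then _ else ansd) = _
    rw [show PySem.List.pyGetD nums d 0 - PySem.List.pyGetD nums c 0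
        = gV nums d - gV nums c from rfl]
    by_cases hdf : 1 < gV nums d - gV nums c
    · rw [if_pos hdf, if_pos hdf, Balt_ab]
    · rw [if_neg hdf, if_neg hdf, add_zero]
  have hc : ∀ (ansc : Int) (c : Int),
      (PySem.List.pyRange (c + 1) (nums.length : Int) 1).foldl (fun ansd d =>
        let diff := PySem.List.pyGetD nums d 0 - PySem.List.pyGetD nums c 0
        if 1 < diff then
          (PySem.List.pyRange 0 c 1).foldl (fun ansa a =>
            (PySem.List.pyRange (a + 1) c 1).foldl (fun ansb b =>
              if PySem.List.pyGetD nums a 0 + PySem.List.pyGetD nums b 0 = diff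
              then ansb + 1 else ansb) ansa) ansd
        else ansd) ansc
        = ansc + ∑ d ∈ Finset.Ico (c + 1) (nums.length : Int),
            (if 1 < gV nums d - gV nums c then
              ∑ a ∈ Finset.Ico 0 c, ∑ b ∈ Finset.Ico (a + 1) c,
                (if gV nums a + gV nums b = gV nums d - gV nums c then (1 : Int) else 0)
            else 0) := by
    intro ansc c
    rw [PySem.List.foldl_congr_mem _ _ _ _ (fun ansd d _ => hd ansd c d),
      PySem.List.foldl_add, sum_map_pyRange_one']
  rw [PySem.List.foldl_congr_mem _ _ _ _ (fun ansc c _ => hc ansc c),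
    PySem.List.foldl_add, sum_map_pyRange_one']
  simp

-- B's (c, d) term as the indicator sum over the full index square
theorem B_term_quad (nums : List Int) (c d : Int) (_hc : 0 ≤ c) (hcd : c < d)
    (hdn : d < (nums.length : Int)) :
    (if 1 < gV nums d - gV nums c then
      ∑ a ∈ Finset.Ico 0 c, ∑ b ∈ Finset.Ico (a + 1) c,
        (if gV nums a + gV nums b = gV nums d - gV nums c then (1 : Int) else 0)
    else 0)
      = ∑ a ∈ Finset.Ico 0 (nums.length : Int), ∑ b ∈ Finset.Ico 0 (nums.length : Int),
          indQ nums a b c d := by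
  by_cases hdf : 1 < gV nums d - gV nums c
  · rw [if_pos hdf]
    have hinner : ∀ a, 0 ≤ a → a < c →
        (∑ b ∈ Finset.Ico (a + 1) c,
          (if gV nums a + gV nums b = gV nums d - gV nums c then (1 : Int) else 0))
        = ∑ b ∈ Finset.Ico 0 (nums.length : Int), indQ nums a b c d := by
      intro a ha hac
      have h1 : ∀ b ∈ Finset.Ico (a + 1) c,
          (if gV nums a + gV nums b = gV nums d - gV nums c then (1 : Int) else 0)
            = indQ nums a b c d := by
        intro b hb
        simp only [Finset.mem_Ico] at hb
        unfold indQ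
        refine if_congr ?_ rfl rfl
        constructor
        · intro h; exact ⟨by omega, by omega, hcd, by omega, by omega⟩
        · intro h; omega
      rw [Finset.sum_congr rfl h1]
      apply Finset.sum_subset
      · intro x hx; simp only [Finset.mem_Ico] at *; omega
      · intro x hx hnx
        simp only [Finset.mem_Ico, not_and, not_lt] at hx hnx
        unfold indQ
        rw [if_neg (by intro h; omega)]
    rw [Finset.sum_congr rfl (fun a ha => hinner a
      (by simp only [Finset.mem_Ico] at ha; omega)
      (by simp only [Finset.mem_Ico] at ha; omega))]
    apply Finset.sum_subset
    · intro x hx; simp only [Finset.mem_Ico] at *; omega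
    · intro x hx hnx
      simp only [Finset.mem_Ico, not_and, not_lt] at hx hnx
      apply Finset.sum_eq_zero
      intro b _
      unfold indQ
      rw [if_neg (by intro h; omega)]
  · rw [if_neg hdf]
    symm
    apply Finset.sum_eq_zero
    intro a _
    apply Finset.sum_eq_zero
    intro b _
    unfold indQ
    rw [if_neg (by intro h; omega)]

-- B as the quadruple-indicator sum, grouped (c, d) outside
theorem B_quad (nums : List Int) :
    countQuadruplets_alt nums
      = ∑ c ∈ Finset.Ico 0 (nums.length : Int), ∑ d ∈ Finset.Ico 0 (nums.length : Int),
          ∑ a ∈ Finset.Ico 0 (nums.length : Int), ∑ b ∈ Finset.Ico 0 (nums.length : Int),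
            indQ nums a b c d := by
  rw [B_char]
  refine Finset.sum_congr rfl (fun c hc => ?_)
  simp only [Finset.mem_Ico] at hc
  rw [Finset.sum_congr rfl (fun d hd => B_term_quad nums c d hc.1
    (by simp only [Finset.mem_Ico] at hd; omega) (by simp only [Finset.mem_Ico] at hd; omega))]
  apply Finset.sum_subset
  · intro x hx; simp only [Finset.mem_Ico] at *; omega
  · intro x hx hnx
    simp only [Finset.mem_Ico, not_and, not_lt] at hx hnx
    apply Finset.sum_eq_zero
    intro a _
    apply Finset.sum_eq_zero
    intro b _
    unfold indQ
    rw [if_neg (by intro h; omega)]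

-- swapping the pair-of-pairs grouping over a common rectangular range
theorem sum4_comm (I : Finset Int) (f : Int → Int → Int → Int → Int) :
    (∑ c ∈ I, ∑ d ∈ I, ∑ a ∈ I, ∑ b ∈ I, f a b c d)
      = ∑ a ∈ I, ∑ b ∈ I, ∑ c ∈ I, ∑ d ∈ I, f a b c d := by
  calc (∑ c ∈ I, ∑ d ∈ I, ∑ a ∈ I, ∑ b ∈ I, f a b c d)
      = ∑ c ∈ I, ∑ a ∈ I, ∑ d ∈ I, ∑ b ∈ I, f a b c d := by
        exact Finset.sum_congr rfl (fun c _ => Finset.sum_comm)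
    _ = ∑ a ∈ I, ∑ c ∈ I, ∑ d ∈ I, ∑ b ∈ I, f a b c d := Finset.sum_comm
    _ = ∑ a ∈ I, ∑ c ∈ I, ∑ b ∈ I, ∑ d ∈ I, f a b c d := by
        exact Finset.sum_congr rfl (fun a _ => Finset.sum_congr rfl (fun c _ => Finset.sum_comm))
    _ = ∑ a ∈ I, ∑ b ∈ I, ∑ c ∈ I, ∑ d ∈ I, f a b c d := by
        exact Finset.sum_congr rfl (fun a _ => Finset.sum_comm)

-- ===== VERDICT (by name: the statement is the Claim_ definition above) =====
theorem countQuadruplets_spec : Claim_equal_countQuadruplets := by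
  intro nums _
  show countQuadruplets nums = countQuadruplets_alt nums
  rw [A_quad, B_quad, sum4_comm]
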